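-- pv_equiv track=rewrite | github.com/perseron/CitoStore | vision-usb-gateway/src/vision_webui/server.py | update_config_file
-- ===== SOURCE A (Python) =====
-- def format_value(value: str) -> str:
--     if value == "":
--         return '""'
--     if any(c.isspace() for c in value) or '"' in value or "#" in value:
--         escaped = value.replace("\\", "\\\\").replace('"', '\\"')
--         return f'"{escaped}"'
--     return value
--
-- def update_config_file(base_text: str, updates: dict) -> str:
--     lines = base_text.splitlines()
--     seen = set()
--     for i, line in enumerate(lines):
--         s = line.strip()
--         if not s or s.startswith("#") or "=" not in s:
--             continue
--         key, _ = s.split("=", 1)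
--         key = key.strip()
--         if key in updates:
--             lines[i] = f"{key}={format_value(updates[key])}"
--             seen.add(key)
--     for key, value in updates.items():
--         if key not in seen:
--             lines.append(f"{key}={format_value(value)}")
--     return "\n".join(lines) + "\n"
-- ===== SOURCE B (Python) =====
-- def format_value(value: str) -> str:
--     if value == "":
--         return '""'
--     if any(c.isspace() for c in value) or '"' in value or "#" in value:
--         escaped = value.replace("\\", "\\\\").replace('"', '\\"')
--         return f'"{escaped}"'
--     return value
--
-- def parse_key(line: str):
--     s = line.strip()
--     if not s or s.startswith("#") or "=" not in s:
--         return None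
--     return s.split("=", 1)[0].strip()
--
-- def update_config_file(base_text: str, updates: dict) -> str:
--     lines = base_text.splitlines()
--     index = {}
--     for i, line in enumerate(lines):
--         k = parse_key(line)
--         if k is not None:
--             index.setdefault(k, []).append(i)
--     for key, value in updates.items():
--         new_line = f"{key}={format_value(value)}"
--         if key in index:
--             for i in index[key]:
--                 lines[i] = new_line
--         else:
--             lines.append(new_line)
--     return "\n".join(lines) + "\n"
-- ===== Notes on version B (the rewrite author's own statement) =====
-- stated objective: alternative
-- what changed: A makes one pass over the lines, rewriting each matching line in place while accumulating a 'seen' set, then appends unseen updates; B first builds an index dict mapping each parseable key to the list of line indices where it occurs, then iterates over the updates, overwriting every indexed occurrence or appending, so the writes are driven by the updates rather than by the lines.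
import Mathlib
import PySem

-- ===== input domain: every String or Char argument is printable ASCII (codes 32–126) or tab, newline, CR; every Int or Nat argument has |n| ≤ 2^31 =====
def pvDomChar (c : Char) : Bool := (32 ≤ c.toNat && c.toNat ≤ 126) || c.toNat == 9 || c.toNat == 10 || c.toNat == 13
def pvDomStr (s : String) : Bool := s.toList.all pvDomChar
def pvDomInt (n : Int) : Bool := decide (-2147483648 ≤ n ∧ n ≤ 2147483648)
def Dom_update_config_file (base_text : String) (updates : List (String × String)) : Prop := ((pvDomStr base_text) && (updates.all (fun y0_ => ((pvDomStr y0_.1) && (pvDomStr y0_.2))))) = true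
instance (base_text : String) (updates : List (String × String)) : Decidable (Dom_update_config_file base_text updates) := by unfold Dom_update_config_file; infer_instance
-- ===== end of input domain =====

-- B replaces A's single mutating pass with a seen-set by a key→line-indices occurrence index built once,
-- then drives all overwrites/appends from the updates dict: an alternative decomposition of the same cost.


-- ===== PORT A =====
-- format_value, shared verbatim by A and B (B's Source B copies it unchanged)
def pvFormatValue (value : String) : String :=
  if value = "" then "\"\""
  else if value.toList.any PySem.Chars.isspace || PySem.Str.isIn "\"" value || PySem.Str.isIn "#" value then
    "\"" ++ PySem.Str.replace (PySem.Str.replace value "\\" "\\\\") "\"" "\\\"" ++ "\""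
  else value

-- the line-parsing steps A performs inline (strip / blank / '#' / '=' tests, split("=",1)[0].strip());
-- B's Source B has them as the helper parse_key, returning None exactly where A 'continue's
def pvParseKey (line : String) : Option String :=
  let s := PySem.Str.strip line
  if s = "" then none
  else if PySem.Str.startswith s "#" then none
  else if !PySem.Str.isIn "=" s then none
  else some (PySem.Str.strip (((PySem.Str.splitMax? s "=" 1).getD []).headD ""))

def update_config_file (base_text : String) (updates : List (String × String)) : String :=
  let d := PySem.Dict.ofList updates
  let lines := PySem.Str.splitlines base_text
  let st := (PySem.List.enumerate lines).foldl
    (fun (st : List String × PySem.Set String) p =>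
      match pvParseKey p.2 with
      | none => st
      | some key =>
        if d.contains key then
          (st.1.set p.1.toNat (key ++ "=" ++ pvFormatValue (d.getD key "")), PySem.Set.add st.2 key)
        else st)
    (lines, PySem.Set.empty)
  let lines2 := d.items.foldl
    (fun ls kv =>
      if PySem.Set.contains st.2 kv.1 then ls else ls ++ [kv.1 ++ "=" ++ pvFormatValue kv.2])
    st.1
  PySem.Str.join "\n" lines2 ++ "\n"

-- ===== PORT B =====
def update_config_file_alt (base_text : String) (updates : List (String × String)) : String :=
  let d := PySem.Dict.ofList updates
  let lines := PySem.Str.splitlines base_text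
  let index := (PySem.List.enumerate lines).foldl
    (fun (ix : PySem.Dict String (List Int)) p =>
      match pvParseKey p.2 with
      | none => ix
      | some k => ix.modify k [] (fun is => is ++ [p.1]))
    PySem.Dict.empty
  let lines2 := d.items.foldl
    (fun ls kv =>
      let newLine := kv.1 ++ "=" ++ pvFormatValue kv.2
      match index.get? kv.1 with
      | some idxs => idxs.foldl (fun ls i => ls.set i.toNat newLine) ls
      | none => ls ++ [newLine])
    lines
  PySem.Str.join "\n" lines2 ++ "\n"

-- ===== PRECONDITION & SPEC =====
def Spec_update_config_file (base_text : String) (updates : List (String × String)) (out : String) : Prop := out = update_config_file_alt base_text updates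
instance (base_text : String) (updates : List (String × String)) (out : String) : Decidable (Spec_update_config_file base_text updates out) := by unfold Spec_update_config_file; infer_instance

-- ===== CLAIM (what is proved, stated in full; the proofs are below) =====
def Claim_equal_update_config_file : Prop := ∀ (base_text : String) (updates : List (String × String)), Dom_update_config_file base_text updates → Spec_update_config_file base_text updates (update_config_file base_text updates)

-- ===== LEMMAS AND PROOFS =====

-- what one original line becomes in the final prefix
def pvG (d : PySem.Dict String String) (l : String) : String :=
  match pvParseKey l with
  | none => l
  | some k => if d.contains k then k ++ "=" ++ pvFormatValue (d.getD k "") else l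

-- the key A adds to `seen` at a line, if any
def pvHA (d : PySem.Dict String String) (l : String) : Option String :=
  match pvParseKey l with
  | none => none
  | some k => if d.contains k then some k else none

-- (key, index) pairs of the parseable lines, in order
def pvP (L : List String) : List (String × Int) :=
  (PySem.List.enumerate L).filterMap (fun p => (pvParseKey p.2).map (fun k => (k, p.1)))

-- B's occurrence index (same fold as in the port)
def pvIndex (L : List String) : PySem.Dict String (List Int) :=
  (PySem.List.enumerate L).foldl
    (fun (ix : PySem.Dict String (List Int)) p =>
      match pvParseKey p.2 with
      | none => ix
      | some k => ix.modify k [] (fun is => is ++ [p.1]))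
    PySem.Dict.empty

theorem pv_foldl_filterMap {α β γ : Type} (f : α → Option β) (g : γ → β → γ) (l : List α) (init : γ) :
    (l.filterMap f).foldl g init
      = l.foldl (fun acc x => match f x with | none => acc | some y => g acc y) init := by
  induction l generalizing init with
  | nil => simp
  | cons x xs ih =>
    cases h : f x <;> simp [h, ih]

theorem pvIndex_eq_foldl_pvP (L : List String) :
    pvIndex L = (pvP L).foldl (fun d q => d.modify q.1 [] (fun is => is ++ [q.2])) PySem.Dict.empty := by
  unfold pvIndex pvP
  rw [pv_foldl_filterMap]
  apply PySem.List.foldl_congr_mem'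
  intro p _ acc
  cases h : pvParseKey p.2 <;> simp

theorem pvIndex_getD (L : List String) (k : String) :
    (pvIndex L).getD k [] = ((pvP L).filter (fun q => q.1 == k)).map (·.2) := by
  rw [pvIndex_eq_foldl_pvP, PySem.Dict.getD_foldl_modify_append, PySem.Dict.getD_empty]
  simp

theorem pv_mem_pvP (L : List String) (k : String) (i : Int) :
    (k, i) ∈ pvP L ↔ ∃ (m : Nat) (h : m < L.length), i = (m : Int) ∧ pvParseKey (L[m]'h) = some k := by
  unfold pvP
  simp only [List.mem_filterMap, PySem.List.mem_enumerate_iff, Option.map_eq_some_iff]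
  constructor
  · rintro ⟨p, ⟨m, hm, rfl⟩, k', hk', hpair⟩
    obtain ⟨rfl, rfl⟩ := Prod.mk.injEq .. ▸ hpair
    exact ⟨m, hm, by simp, by simpa using hk'⟩
  · rintro ⟨m, hm, rfl, hk⟩
    exact ⟨((m : Int), L[m]'hm), ⟨m, hm, by simp⟩, k, hk, by simp⟩

theorem pv_mem_idxs (L : List String) (k : String) (i : Int) :
    i ∈ (pvIndex L).getD k [] ↔ ∃ (m : Nat) (h : m < L.length), i = (m : Int) ∧ pvParseKey (L[m]'h) = some k := by
  rw [pvIndex_getD]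
  simp only [List.mem_map, List.mem_filter]
  constructor
  · rintro ⟨⟨k', i'⟩, ⟨hq, hk⟩, rfl⟩
    simp only [beq_iff_eq] at hk
    subst hk
    exact (pv_mem_pvP L k' i').1 hq
  · intro h
    exact ⟨(k, i), ⟨(pv_mem_pvP L k i).2 h, by simp⟩, rfl⟩

theorem pv_idxs_bounds (L : List String) (k : String) (i : Int) (h : i ∈ (pvIndex L).getD k []) :
    0 ≤ i ∧ i < (L.length : Int) := by
  obtain ⟨m, hm, rfl, -⟩ := (pv_mem_idxs L k i).1 h
  constructor <;> omega

theorem pv_idxs_unique (L : List String) (k k' : String) (i : Int)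
    (h : i ∈ (pvIndex L).getD k []) (h' : i ∈ (pvIndex L).getD k' []) : k = k' := by
  obtain ⟨m, hm, him, hk⟩ := (pv_mem_idxs L k i).1 h
  obtain ⟨m', hm', him', hk'⟩ := (pv_mem_idxs L k' i).1 h'
  have : m' = m := by omega
  subst this
  rw [hk] at hk'
  exact Option.some.inj hk'

theorem pvIndex_get?_eq_none (L : List String) (k : String) :
    (pvIndex L).get? k = none ↔ ¬ ∃ l ∈ L, pvParseKey l = some k := by
  rw [PySem.Dict.get?_eq_none_iff_not_mem_keys, pvIndex_eq_foldl_pvP]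
  rw [PySem.Dict.keys_foldl_modify_key]
  simp only [PySem.Dict.keys_empty, PySem.Set.update_nil_left, PySem.Set.mem_ofList]
  constructor
  · intro h hc
    apply h
    obtain ⟨l, hl, hk⟩ := hc
    obtain ⟨m, hm, rfl⟩ := List.mem_iff_getElem.1 hl
    exact List.mem_map.2 ⟨(k, (m : Int)), (pv_mem_pvP L k m).2 ⟨m, hm, rfl, hk⟩, rfl⟩
  · intro h hc
    apply h
    obtain ⟨⟨k', i⟩, hq, rfl⟩ := List.mem_map.1 hc
    obtain ⟨m, hm, rfl, hk⟩ := (pv_mem_pvP L k' i).1 hq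
    exact ⟨L[m]'hm, List.getElem_mem hm, hk⟩

-- A's first loop, generalized over a processed prefix
theorem pv_loopA (d : PySem.Dict String String) (rest : List String) :
    ∀ (pre : List String) (s0 : PySem.Set String),
    (PySem.List.enumerate rest (pre.length : Int)).foldl
      (fun (st : List String × PySem.Set String) p =>
        match pvParseKey p.2 with
        | none => st
        | some key =>
          if d.contains key then
            (st.1.set p.1.toNat (key ++ "=" ++ pvFormatValue (d.getD key "")), PySem.Set.add st.2 key)
          else st)
      (pre ++ rest, s0)
    = (pre ++ rest.map (pvG d), PySem.Set.update s0 (rest.filterMap (pvHA d))) := by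
  induction rest with
  | nil => intro pre s0; simp [PySem.List.enumerate, PySem.Set.update]
  | cons l rest ih =>
    intro pre s0
    rw [PySem.List.enumerate_cons, List.foldl_cons]
    cases hk : pvParseKey l with
    | none =>
      simp only []
      have h1 : pre ++ l :: rest = (pre ++ [l]) ++ rest := by simp
      have h2 : (pre.length : Int) + 1 = ((pre ++ [l]).length : Int) := by simp
      rw [h1, h2, ih (pre ++ [l]) s0]
      simp [pvG, pvHA, hk]
    | some k =>
      simp only []
      by_cases hc : d.contains k = true
      · simp only [hc, if_true]
        have hset : (pre ++ l :: rest).set ((pre.length : Int)).toNat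
              (k ++ "=" ++ pvFormatValue (d.getD k ""))
            = (pre ++ [k ++ "=" ++ pvFormatValue (d.getD k "")]) ++ rest := by
          simp
        have h2 : (pre.length : Int) + 1 = ((pre ++ [k ++ "=" ++ pvFormatValue (d.getD k "")]).length : Int) := by simp
        simp only [hset]
        rw [h2, ih (pre ++ [k ++ "=" ++ pvFormatValue (d.getD k "")]) (PySem.Set.add s0 k)]
        simp [pvG, pvHA, hk, hc, PySem.Set.update]
      · rw [if_neg hc]
        have h1 : pre ++ l :: rest = (pre ++ [l]) ++ rest := by simp
        have h2 : (pre.length : Int) + 1 = ((pre ++ [l]).length : Int) := by simp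
        rw [h1, h2, ih (pre ++ [l]) s0]
        simp [pvG, pvHA, hk, hc]

-- A's second loop is an append of the unseen updates
theorem pv_loopA2 (seen : PySem.Set String) (its : List (String × String)) (acc : List String) :
    its.foldl
      (fun ls kv => if PySem.Set.contains seen kv.1 then ls else ls ++ [kv.1 ++ "=" ++ pvFormatValue kv.2]) acc
    = acc ++ (its.filter (fun kv => !PySem.Set.contains seen kv.1)).map
        (fun kv => kv.1 ++ "=" ++ pvFormatValue kv.2) := by
  have h : ∀ kv ∈ its, ∀ ls : List String,
      (if PySem.Set.contains seen kv.1 then ls else ls ++ [kv.1 ++ "=" ++ pvFormatValue kv.2])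
        = (if (!PySem.Set.contains seen kv.1) = true then ls ++ [kv.1 ++ "=" ++ pvFormatValue kv.2] else ls) := by
    intro kv _ ls
    cases PySem.Set.contains seen kv.1 <;> simp
  exact (PySem.List.foldl_congr_mem' its _ _ acc h).trans
    (PySem.List.foldl_append_if (fun kv => !PySem.Set.contains seen kv.1)
      (fun kv => kv.1 ++ "=" ++ pvFormatValue kv.2) its acc)

theorem pv_setfold_len (ids : List Int) (v : String) (M : List String) :
    (ids.foldl (fun ls i => ls.set i.toNat v) M).length = M.length := by
  induction ids generalizing M with
  | nil => rfl
  | cons i rest ih => simp [ih]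

theorem pv_setfold_getElem? (ids : List Int) (v : String) :
    ∀ (M : List String) (j : Nat), (∀ i ∈ ids, 0 ≤ i) →
    (ids.foldl (fun ls i => ls.set i.toNat v) M)[j]?
      = if (j : Int) ∈ ids ∧ j < M.length then some v else M[j]? := by
  induction ids with
  | nil => intro M j h; simp
  | cons i rest ih =>
    intro M j h
    have h0 : 0 ≤ i := h i (List.mem_cons_self ..)
    rw [List.foldl_cons, ih _ j (fun i hi => h i (List.mem_cons_of_mem _ hi))]
    rw [List.length_set, List.getElem?_set]
    by_cases hji : (j : Int) = i
    · have hij : i.toNat = j := by omega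
      subst hji
      simp only [hij, List.mem_cons, true_or, true_and]
      by_cases hl : j < M.length
      · by_cases hr : (j : Int) ∈ rest <;> simp [hr, hl]
      · have : M[j]? = none := List.getElem?_eq_none (by omega)
        by_cases hr : (j : Int) ∈ rest <;> simp [hr, hl]
    · have : ¬ i.toNat = j := by omega
      simp only [List.mem_cons, this, if_false]
      by_cases hr : (j : Int) ∈ rest <;> simp [hr, hji]

theorem pv_setfold_append (ids : List Int) (v : String) :
    ∀ (M E : List String), (∀ i ∈ ids, 0 ≤ i ∧ i < (M.length : Int)) →
    ids.foldl (fun ls i => ls.set i.toNat v) (M ++ E)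
      = ids.foldl (fun ls i => ls.set i.toNat v) M ++ E := by
  induction ids with
  | nil => intro M E h; rfl
  | cons i rest ih =>
    intro M E h
    obtain ⟨h0, hlt⟩ := h i (List.mem_cons_self ..)
    rw [List.foldl_cons, List.foldl_cons, List.set_append, if_pos (by omega)]
    exact ih (M.set i.toNat v) E (by
      intro i' hi'
      obtain ⟨h0', hlt'⟩ := h i' (List.mem_cons_of_mem _ hi')
      simp only [List.length_set]
      exact ⟨h0', hlt'⟩)

-- the overwrite-only part of B's second loop
def pvStep1 (L : List String) (M : List String) (kv : String × String) : List String :=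
  match (pvIndex L).get? kv.1 with
  | some idxs => idxs.foldl (fun ls i => ls.set i.toNat (kv.1 ++ "=" ++ pvFormatValue kv.2)) M
  | none => M

theorem pv_loopB_decomp (L : List String) (its : List (String × String)) :
    ∀ (M E : List String), M.length = L.length →
    its.foldl
      (fun ls kv =>
        let newLine := kv.1 ++ "=" ++ pvFormatValue kv.2
        match (pvIndex L).get? kv.1 with
        | some idxs => idxs.foldl (fun ls i => ls.set i.toNat newLine) ls
        | none => ls ++ [newLine])
      (M ++ E)
    = its.foldl (pvStep1 L) M ++ E
        ++ (its.filter (fun kv => ((pvIndex L).get? kv.1).isNone)).map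
            (fun kv => kv.1 ++ "=" ++ pvFormatValue kv.2) := by
  induction its with
  | nil => intro M E hM; simp
  | cons kv rest ih =>
    intro M E hM
    rw [List.foldl_cons, List.foldl_cons]
    cases hk : (pvIndex L).get? kv.1 with
    | none =>
      simp only []
      rw [List.append_assoc, ih M (E ++ [kv.1 ++ "=" ++ pvFormatValue kv.2]) hM]
      simp [pvStep1, hk]
    | some ids =>
      simp only []
      have hids : ids = (pvIndex L).getD kv.1 [] := by
        rw [PySem.Dict.getD_eq_get?_getD, hk]; rfl
      have hb : ∀ i ∈ ids, 0 ≤ i ∧ i < (M.length : Int) := by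
        intro i hi
        have := pv_idxs_bounds L kv.1 i (hids ▸ hi)
        exact ⟨this.1, by omega⟩
      rw [pv_setfold_append ids _ M E hb,
        ih _ E (by rw [pv_setfold_len]; exact hM)]
      simp [pvStep1, hk]

theorem pv_step1_len1 (L : List String) (M : List String) (kv : String × String) :
    (pvStep1 L M kv).length = M.length := by
  unfold pvStep1
  cases (pvIndex L).get? kv.1 with
  | none => rfl
  | some ids => exact pv_setfold_len ids _ M

theorem pv_step1_len (L : List String) (its : List (String × String)) :
    ∀ (M : List String), (its.foldl (pvStep1 L) M).length = M.length := by
  induction its with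
  | nil => intro M; rfl
  | cons kv rest ih => intro M; rw [List.foldl_cons, ih, pv_step1_len1]

theorem pv_step1_entry_none (L : List String) (its : List (String × String)) :
    ∀ (M : List String) (j : Nat), (∀ kv ∈ its, (j : Int) ∉ (pvIndex L).getD kv.1 []) →
    (its.foldl (pvStep1 L) M)[j]? = M[j]? := by
  induction its with
  | nil => intro M j h; rfl
  | cons kv rest ih =>
    intro M j h
    rw [List.foldl_cons, ih _ j (fun kv' h' => h kv' (List.mem_cons_of_mem _ h'))]
    unfold pvStep1
    cases hk : (pvIndex L).get? kv.1 with
    | none => rfl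
    | some ids =>
      have hids : ids = (pvIndex L).getD kv.1 [] := by
        rw [PySem.Dict.getD_eq_get?_getD, hk]; rfl
      have hj : (j : Int) ∉ ids := hids ▸ h kv (List.mem_cons_self ..)
      rw [pv_setfold_getElem? ids _ M j
        (fun i hi => (pv_idxs_bounds L kv.1 i (hids ▸ hi)).1)]
      simp [hj]

theorem pv_step1_entry_write (L : List String) (its : List (String × String)) :
    ∀ (M : List String) (j : Nat) (kv₀ : String × String), (its.map (·.1)).Nodup → kv₀ ∈ its →
    (j : Int) ∈ (pvIndex L).getD kv₀.1 [] → j < M.length →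
    (its.foldl (pvStep1 L) M)[j]? = some (kv₀.1 ++ "=" ++ pvFormatValue kv₀.2) := by
  induction its with
  | nil => intro M j kv₀ _ hmem; exact absurd hmem (List.not_mem_nil)
  | cons kv rest ih =>
    intro M j kv₀ hnd hmem hj hjM
    rw [List.map_cons, List.nodup_cons] at hnd
    rcases List.mem_cons.1 hmem with rfl | hmem'
    · -- head writes j, the rest never touches it
      rw [List.foldl_cons]
      have hnone : ∀ kv' ∈ rest, (j : Int) ∉ (pvIndex L).getD kv'.1 [] := by
        intro kv' hkv' hj'
        exact hnd.1 (pv_idxs_unique L kv'.1 kv₀.1 (j : Int) hj' hj ▸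
          List.mem_map_of_mem hkv')
      rw [pv_step1_entry_none L rest _ j hnone]
      unfold pvStep1
      cases hk : (pvIndex L).get? kv₀.1 with
      | none =>
        exfalso
        rw [PySem.Dict.getD_eq_get?_getD, hk] at hj
        exact absurd hj (List.not_mem_nil)
      | some ids =>
        have hids : ids = (pvIndex L).getD kv₀.1 [] := by
          rw [PySem.Dict.getD_eq_get?_getD, hk]; rfl
        rw [pv_setfold_getElem? ids _ M j
          (fun i hi => (pv_idxs_bounds L kv₀.1 i (hids ▸ hi)).1)]
        simp [hids ▸ hj, hjM]
    · -- head does not touch j, recurse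
      rw [List.foldl_cons]
      have hne : kv.1 ≠ kv₀.1 := by
        intro he
        exact hnd.1 (he ▸ List.mem_map_of_mem hmem')
      have hM' : j < (pvStep1 L M kv).length := by rw [pv_step1_len1]; exact hjM
      have := ih (pvStep1 L M kv) j kv₀ hnd.2 hmem' hj hM'
      exact this

theorem pv_step1_eq_map (L : List String) (d : PySem.Dict String String) (hnd : d.keys.Nodup) :
    d.items.foldl (pvStep1 L) L = L.map (pvG d) := by
  have hnd' : (d.items.map (·.1)).Nodup := by
    simpa [PySem.Dict.keys] using hnd
  apply List.ext_getElem?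
  intro j
  by_cases hj : j < L.length
  · cases hkey : pvParseKey (L[j]'hj) with
    | none =>
      rw [pv_step1_entry_none L d.items L j (by
        intro kv hkv hmem
        obtain ⟨m, hm, hme, hk⟩ := (pv_mem_idxs L kv.1 (j : Int)).1 hmem
        have : m = j := by omega
        subst this
        rw [hkey] at hk
        simp at hk)]
      rw [List.getElem?_eq_getElem hj, List.getElem?_map, List.getElem?_eq_getElem hj]
      simp [pvG, hkey]
    | some k =>
      by_cases hc : d.contains k = true
      · have hs : (d.get? k).isSome := by
          rw [← PySem.Dict.contains_eq_isSome_get?]; exact hc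
        obtain ⟨v, hv⟩ := Option.isSome_iff_exists.1 hs
        have hkv : (k, v) ∈ d.items := PySem.Dict.mem_items_of_get?_eq_some d hv
        have hjm : (j : Int) ∈ (pvIndex L).getD k [] :=
          (pv_mem_idxs L k (j : Int)).2 ⟨j, hj, rfl, hkey⟩
        rw [pv_step1_entry_write L d.items L j (k, v) hnd' hkv hjm hj]
        rw [List.getElem?_map, List.getElem?_eq_getElem hj]
        simp [pvG, hkey, hc, PySem.Dict.getD_of_get?_eq_some d "" hv]
      · rw [pv_step1_entry_none L d.items L j (by
          intro kv hkv hmem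
          obtain ⟨m, hm, hme, hk⟩ := (pv_mem_idxs L kv.1 (j : Int)).1 hmem
          have : m = j := by omega
          subst this
          rw [hkey] at hk
          have he : kv.1 = k := (Option.some.inj hk).symm
          apply hc
          exact (PySem.Dict.contains_iff_mem_keys d k).2
            (he ▸ PySem.Dict.mem_keys_of_mem_items d hkv))]
        rw [List.getElem?_eq_getElem hj, List.getElem?_map, List.getElem?_eq_getElem hj]
        simp [pvG, hkey, hc]
  · rw [List.getElem?_eq_none (by rw [pv_step1_len]; omega),
      List.getElem?_eq_none (by rw [List.length_map]; omega)]

theorem pv_seen_eq_index (L : List String) (d : PySem.Dict String String)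
    (kv : String × String) (hkv : kv ∈ d.items) :
    (!PySem.Set.contains (PySem.Set.ofList (L.filterMap (pvHA d))) kv.1)
      = ((pvIndex L).get? kv.1).isNone := by
  have hc : d.contains kv.1 = true :=
    (PySem.Dict.contains_iff_mem_keys d kv.1).2 (PySem.Dict.mem_keys_of_mem_items d hkv)
  by_cases hex : ∃ l ∈ L, pvParseKey l = some kv.1
  · obtain ⟨l, hl, hpl⟩ := hex
    have h1 : PySem.Set.contains (PySem.Set.ofList (L.filterMap (pvHA d))) kv.1 = true :=
      (PySem.Set.contains_iff _ kv.1).2 ((PySem.Set.mem_ofList _ kv.1).2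
        (List.mem_filterMap.2 ⟨l, hl, by simp [pvHA, hpl, hc]⟩))
    have h2 : (pvIndex L).get? kv.1 ≠ none := by
      rw [Ne, pvIndex_get?_eq_none]
      exact fun h => h ⟨l, hl, hpl⟩
    rw [h1]
    cases hg : (pvIndex L).get? kv.1 with
    | none => exact absurd hg h2
    | some ids => rfl
  · have h1 : PySem.Set.contains (PySem.Set.ofList (L.filterMap (pvHA d))) kv.1 = false := by
      rw [Bool.eq_false_iff, Ne, PySem.Set.contains_iff, PySem.Set.mem_ofList, List.mem_filterMap]
      rintro ⟨l, hl, hha⟩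
      apply hex
      refine ⟨l, hl, ?_⟩
      unfold pvHA at hha
      cases hp : pvParseKey l with
      | none => rw [hp] at hha; simp at hha
      | some k' =>
        rw [hp] at hha
        by_cases hck : d.contains k' = true
        · simp only [hck, if_true] at hha
          simpa using hha
        · simp [hck] at hha
    have h2 : (pvIndex L).get? kv.1 = none := (pvIndex_get?_eq_none L kv.1).2 hex
    rw [h1, h2]
    rfl

-- ===== VERDICT (by name: the statement is the Claim_ definition above) =====
theorem update_config_file_spec : Claim_equal_update_config_file := by
  unfold Claim_equal_update_config_file Spec_update_config_file
  intro base updates _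
  have hnd := PySem.Dict.nodup_keys_ofList (κ := String) (ν := String) updates
  have hA := pv_loopA (PySem.Dict.ofList updates) (PySem.Str.splitlines base) [] PySem.Set.empty
  simp only [List.nil_append, List.length_nil, Nat.cast_zero] at hA
  have hB := pv_loopB_decomp (PySem.Str.splitlines base)
    (PySem.Dict.ofList updates).items (PySem.Str.splitlines base) [] rfl
  simp only [List.append_nil] at hB
  have hIdxDef : pvIndex (PySem.Str.splitlines base)
      = (PySem.List.enumerate (PySem.Str.splitlines base)).foldl
          (fun (ix : PySem.Dict String (List Int)) p =>
            match pvParseKey p.2 with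
            | none => ix
            | some k => ix.modify k [] (fun is => is ++ [p.1]))
          PySem.Dict.empty := rfl
  unfold update_config_file update_config_file_alt
  simp only [hA]
  rw [pv_loopA2]
  simp only [← hIdxDef]
  rw [hB, pv_step1_eq_map _ _ hnd]
  have hfil : ((PySem.Dict.ofList updates).items.filter
        (fun kv => !PySem.Set.contains
          (PySem.Set.update PySem.Set.empty
            ((PySem.Str.splitlines base).filterMap (pvHA (PySem.Dict.ofList updates)))) kv.1))
      = ((PySem.Dict.ofList updates).items.filter
        (fun kv => ((pvIndex (PySem.Str.splitlines base)).get? kv.1).isNone)) := by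
    apply List.filter_congr
    intro kv hkv
    rw [show (PySem.Set.empty : PySem.Set String) = ([] : PySem.Set String) from rfl,
      PySem.Set.update_nil_left]
    exact pv_seen_eq_index (PySem.Str.splitlines base) (PySem.Dict.ofList updates) kv hkv
  rw [hfil]
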